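-- pv_equiv track=rewrite | github.com/joao2212/Programa-o-paralela-20251 | ATV-Eficiencia/Main.py | extrair_numeros
-- ===== SOURCE A (Python) =====
-- def extrair_numeros(linhas):
--     numeros = []
--     for linha in linhas:
--         digitos = ''.join(filter(str.isdigit, linha))
--         if not digitos:
--             numeros.append(0)
--         else:
--             numeros.append(int(digitos[0] * 2) if len(digitos) == 1 else int(digitos[0] + digitos[-1]))
--     return numeros
-- ===== SOURCE B (Python) =====
-- def extrair_numeros(linhas):
--     return [_valor_linha(linha) for linha in linhas]
--
-- def _valor_linha(linha):
--     first = last = None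
--     for ch in linha:
--         if ch.isdigit():
--             if first is None:
--                 first = ch
--             last = ch
--     return 0 if first is None else 10 * int(first) + int(last)
-- ===== Notes on version B (the rewrite author's own statement) =====
-- stated objective: simpler
-- what changed: Instead of materialising the full filtered digit string per line and branching on its length (with a separate single-digit case), B does one pass per line tracking only the first and last digit seen and computes 10*int(first)+int(last), which subsumes the single-digit case.
import Mathlib
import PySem

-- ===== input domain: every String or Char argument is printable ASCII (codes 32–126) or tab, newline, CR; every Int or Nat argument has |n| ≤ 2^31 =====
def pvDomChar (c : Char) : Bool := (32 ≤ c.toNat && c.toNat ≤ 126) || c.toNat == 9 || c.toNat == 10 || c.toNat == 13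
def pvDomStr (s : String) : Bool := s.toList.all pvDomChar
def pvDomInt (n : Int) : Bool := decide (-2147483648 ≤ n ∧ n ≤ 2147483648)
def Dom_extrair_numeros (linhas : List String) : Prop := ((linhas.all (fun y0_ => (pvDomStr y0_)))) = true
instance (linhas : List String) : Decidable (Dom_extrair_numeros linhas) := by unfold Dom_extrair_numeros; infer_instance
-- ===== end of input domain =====

-- B replaces A's per-line filtered digit string (and its separate single-digit branch)
-- with a single pass tracking only the first and last digit seen; same values, simpler.


-- ===== PORT A =====
def extrair_numeros (linhas : List String) : List Int :=
  linhas.foldl (fun numeros linha =>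
    let digitos : List Char := linha.toList.filter PySem.Chars.isdigit
    if digitos = [] then
      numeros ++ [0]
    else if digitos.length = 1 then
      -- int(digitos[0] * 2); the .getD defaults are unreachable (digitos ≠ [], all digits)
      let d0 := (PySem.List.pyGet? digitos 0).getD '0'
      numeros ++ [(PySem.Int.ofChars? [d0, d0]).getD 0]
    else
      -- int(digitos[0] + digitos[-1])
      let d0 := (PySem.List.pyGet? digitos 0).getD '0'
      let dl := (PySem.List.pyGet? digitos (-1)).getD '0'
      numeros ++ [(PySem.Int.ofChars? [d0, dl]).getD 0]) []

-- ===== PORT B =====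
-- the inner loop of _valor_linha: update (first, last) on each character
def pvFirstLast (st : Option Char × Option Char) (ch : Char) : Option Char × Option Char :=
  if PySem.Chars.isdigit ch then
    ((match st.1 with | none => some ch | some f => some f), some ch)
  else st

-- _valor_linha: one pass keeping only first/last digit; int(c) unreachable default .getD 0
def pvValorLinha (linha : String) : Int :=
  match linha.toList.foldl pvFirstLast (none, none) with
  | (some f, some l) => 10 * ((PySem.Int.ofChars? [f]).getD 0) + (PySem.Int.ofChars? [l]).getD 0
  | _ => 0

def extrair_numeros_alt (linhas : List String) : List Int :=
  linhas.map pvValorLinha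

-- ===== PRECONDITION & SPEC =====
def Spec_extrair_numeros (linhas : List String) (out : List Int) : Prop := out = extrair_numeros_alt linhas
instance (linhas : List String) (out : List Int) : Decidable (Spec_extrair_numeros linhas out) := by unfold Spec_extrair_numeros; infer_instance

-- ===== CLAIM (what is proved, stated in full; the proofs are below) =====
def Claim_equal_extrair_numeros : Prop := ∀ (linhas : List String), Dom_extrair_numeros linhas → Spec_extrair_numeros linhas (extrair_numeros linhas)

-- ===== LEMMAS AND PROOFS =====

theorem pv_digit_mem (a : Char) (ha : PySem.Chars.isdigit a = true) :
    a ∈ ['0','1','2','3','4','5','6','7','8','9'] := by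
  simp only [PySem.Chars.isdigit, Bool.and_eq_true, decide_eq_true_eq, Char.le_def] at ha
  obtain ⟨h1, h2⟩ := ha
  have hlo : 48 ≤ a.toNat := h1
  have hhi : a.toNat ≤ 57 := h2
  have hofnat := Char.ofNat_toNat a
  interval_cases h : a.toNat <;> (rw [← hofnat]; decide)

theorem pv_ofChars_two (a b : Char) (ha : PySem.Chars.isdigit a = true) (hb : PySem.Chars.isdigit b = true) :
    PySem.Int.ofChars? [a, b] = some (10 * ((a.toNat : Int) - 48) + ((b.toNat : Int) - 48)) := by
  have ha' := pv_digit_mem a ha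
  have hb' := pv_digit_mem b hb
  fin_cases ha' <;> fin_cases hb' <;> decide

theorem pv_ofChars_one (a : Char) (ha : PySem.Chars.isdigit a = true) :
    PySem.Int.ofChars? [a] = some ((a.toNat : Int) - 48) := by
  have ha' := pv_digit_mem a ha
  fin_cases ha' <;> decide

-- B's inner loop, started with a digit already seen
theorem pv_fl_some (cs : List Char) (f l : Char) :
    cs.foldl pvFirstLast (some f, some l) =
      (some f, some ((cs.filter PySem.Chars.isdigit).getLastD l)) := by
  induction cs generalizing l with
  | nil => simp
  | cons c cs ih =>
    by_cases hc : PySem.Chars.isdigit c = true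
    · rw [List.foldl_cons,
        show pvFirstLast (some f, some l) c = (some f, some c) by simp [pvFirstLast, hc],
        ih c, List.filter_cons_of_pos hc, List.getLastD_cons]
    · simp only [Bool.not_eq_true] at hc
      rw [List.foldl_cons,
        show pvFirstLast (some f, some l) c = (some f, some l) by simp [pvFirstLast, hc],
        ih l, List.filter_cons_of_neg (by simp [hc])]

-- B's inner loop computes (head?, getLast?) of A's filtered digit list
theorem pv_fl_none (cs : List Char) :
    cs.foldl pvFirstLast (none, none) =
      ((cs.filter PySem.Chars.isdigit).head?, (cs.filter PySem.Chars.isdigit).getLast?) := by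
  induction cs with
  | nil => simp
  | cons c cs ih =>
    by_cases hc : PySem.Chars.isdigit c = true
    · rw [List.foldl_cons,
        show pvFirstLast (none, none) c = (some c, some c) by simp [pvFirstLast, hc],
        pv_fl_some, List.filter_cons_of_pos hc]
      simp [List.getLast?_cons]
    · simp only [Bool.not_eq_true] at hc
      rw [List.foldl_cons,
        show pvFirstLast (none, none) c = (none, none) by simp [pvFirstLast, hc],
        ih, List.filter_cons_of_neg (by simp [hc])]

-- A's branch on a list of digit characters equals B's first/last formula
theorem pv_val_eq (ds : List Char) (hall : ∀ c ∈ ds, PySem.Chars.isdigit c = true) :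
    (if ds = [] then (0 : Int)
     else if ds.length = 1 then
       (PySem.Int.ofChars? [(PySem.List.pyGet? ds 0).getD '0',
                            (PySem.List.pyGet? ds 0).getD '0']).getD 0
     else
       (PySem.Int.ofChars? [(PySem.List.pyGet? ds 0).getD '0',
                            (PySem.List.pyGet? ds (-1)).getD '0']).getD 0)
    = (match (ds.head?, ds.getLast?) with
       | (some f, some l) =>
         10 * ((PySem.Int.ofChars? [f]).getD 0) + (PySem.Int.ofChars? [l]).getD 0
       | _ => (0 : Int)) := by
  cases ds with
  | nil => simp
  | cons d t =>
    have hd : PySem.Chars.isdigit d = true := hall d (List.mem_cons_self)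
    cases t with
    | nil =>
      simp [pv_ofChars_two d d hd hd, pv_ofChars_one d hd]
    | cons e u =>
      have hlast : (d :: e :: u).getLast? = some ((e :: u).getLastD d) := by
        simp [List.getLast?_cons]
      have hl : PySem.Chars.isdigit ((e :: u).getLastD d) = true :=
        hall _ (List.mem_of_getLast? hlast)
      rw [if_neg (by simp), if_neg (by simp)]
      rw [PySem.List.pyGet?_zero_cons, PySem.List.pyGet?_neg_one, hlast]
      simp only [Option.getD_some, List.head?_cons]
      rw [pv_ofChars_two d _ hd hl, pv_ofChars_one d hd, pv_ofChars_one _ hl]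
      simp

-- the two per-line values agree
theorem pv_line_eq (linha : String) :
    (let digitos : List Char := linha.toList.filter PySem.Chars.isdigit
     if digitos = [] then (0 : Int)
     else if digitos.length = 1 then
       (PySem.Int.ofChars? [(PySem.List.pyGet? digitos 0).getD '0',
                            (PySem.List.pyGet? digitos 0).getD '0']).getD 0
     else
       (PySem.Int.ofChars? [(PySem.List.pyGet? digitos 0).getD '0',
                            (PySem.List.pyGet? digitos (-1)).getD '0']).getD 0)
    = pvValorLinha linha := by
  unfold pvValorLinha
  rw [pv_fl_none]
  exact pv_val_eq _ (fun c hc => List.of_mem_filter hc)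

theorem pv_foldl_map (linhas : List String) (acc : List Int) :
    linhas.foldl (fun numeros linha =>
      let digitos : List Char := linha.toList.filter PySem.Chars.isdigit
      if digitos = [] then
        numeros ++ [0]
      else if digitos.length = 1 then
        let d0 := (PySem.List.pyGet? digitos 0).getD '0'
        numeros ++ [(PySem.Int.ofChars? [d0, d0]).getD 0]
      else
        let d0 := (PySem.List.pyGet? digitos 0).getD '0'
        let dl := (PySem.List.pyGet? digitos (-1)).getD '0'
        numeros ++ [(PySem.Int.ofChars? [d0, dl]).getD 0]) acc
    = acc ++ linhas.map pvValorLinha := by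
  induction linhas generalizing acc with
  | nil => simp
  | cons linha rest ih =>
    have hline := pv_line_eq linha
    simp only [List.foldl_cons, List.map_cons]
    rw [ih]
    simp only at hline
    split_ifs with h1 h2 <;>
      simp_all [List.append_assoc]

-- ===== VERDICT (by name: the statement is the Claim_ definition above) =====
theorem extrair_numeros_spec : Claim_equal_extrair_numeros := by
  intro linhas _
  unfold Spec_extrair_numeros extrair_numeros extrair_numeros_alt
  simpa using pv_foldl_map linhas []
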